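-- pv_equiv track=rewrite | github.com/ryankawahara/dl4m-final | api_test.py | process_genres
-- ===== SOURCE A (Python) =====
-- def process_genres(genre_ids):
--     output = [0] * 10
--
--     for id in genre_ids:
--         if id == 28:
--             output[0] = 1
--         if id == 12:
--             output[1] = 1
--         if id == 35:
--             output[2] = 1
--         if id == 80:
--             output[3] = 1
--         if id == 18:
--             output[4] = 1
--         if id == 27:
--             output[5] = 1
--         if id == 9648:
--             output[6] = 1
--         if id == 10749:
--             output[7] = 1
--         if id == 878:
--             output[8] = 1
--         if id == 53:
--             output[9] = 1
--     return (output)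
-- ===== SOURCE B (Python) =====
-- GENRES = [28, 12, 35, 80, 18, 27, 9648, 10749, 878, 53]
--
-- def process_genres(genre_ids):
--     present = set(genre_ids)
--     return [1 if g in present else 0 for g in GENRES]
-- ===== Notes on version B (the rewrite author's own statement) =====
-- stated objective: simpler
-- what changed: Inverted the loop: instead of scanning the input and testing each of 10 genre constants with 10 ifs mutating a preallocated list, B builds a set of the input once and maps the fixed genre list to membership indicators.
import Mathlib
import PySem

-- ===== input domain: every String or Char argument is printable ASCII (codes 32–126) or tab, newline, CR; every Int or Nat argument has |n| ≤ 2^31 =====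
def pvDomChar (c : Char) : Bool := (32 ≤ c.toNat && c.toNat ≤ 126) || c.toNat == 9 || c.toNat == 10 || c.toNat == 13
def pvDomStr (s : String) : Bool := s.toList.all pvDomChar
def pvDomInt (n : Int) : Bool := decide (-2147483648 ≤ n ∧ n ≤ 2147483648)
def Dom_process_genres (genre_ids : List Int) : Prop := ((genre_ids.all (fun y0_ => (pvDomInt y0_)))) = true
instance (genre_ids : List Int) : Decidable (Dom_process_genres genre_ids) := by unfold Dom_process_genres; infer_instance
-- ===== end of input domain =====

-- ===== PORT A =====
-- One honest line: B replaces A's input-scan with ten constant ifs by a one-pass set + map over the fixed genre list (simpler).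
def GENRES : List Int := [28, 12, 35, 80, 18, 27, 9648, 10749, 878, 53]

def stepA (out : List Int) (id : Int) : List Int :=
  let out := if id = 28 then out.set 0 1 else out
  let out := if id = 12 then out.set 1 1 else out
  let out := if id = 35 then out.set 2 1 else out
  let out := if id = 80 then out.set 3 1 else out
  let out := if id = 18 then out.set 4 1 else out
  let out := if id = 27 then out.set 5 1 else out
  let out := if id = 9648 then out.set 6 1 else out
  let out := if id = 10749 then out.set 7 1 else out
  let out := if id = 878 then out.set 8 1 else out
  let out := if id = 53 then out.set 9 1 else out
  out

def process_genres (genre_ids : List Int) : List Int :=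
  genre_ids.foldl stepA [0, 0, 0, 0, 0, 0, 0, 0, 0, 0]

-- ===== PORT B =====
def process_genres_alt (genre_ids : List Int) : List Int :=
  let present : PySem.Set Int := PySem.Set.ofList genre_ids
  GENRES.map (fun g => if PySem.Set.contains present g then 1 else 0)

-- ===== PRECONDITION & SPEC =====
def Spec_process_genres (genre_ids : List Int) (out : List Int) : Prop := out = process_genres_alt genre_ids
instance (genre_ids : List Int) (out : List Int) : Decidable (Spec_process_genres genre_ids out) := by unfold Spec_process_genres; infer_instance

-- ===== CLAIM (what is proved, stated in full; the proofs are below) =====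
def Claim_equal_process_genres : Prop := ∀ (genre_ids : List Int), Dom_process_genres genre_ids → Spec_process_genres genre_ids (process_genres genre_ids)

-- ===== LEMMAS AND PROOFS =====
lemma step_map (a : Int) (f : Int → Int) :
    stepA (GENRES.map f) a = GENRES.map (fun g => if a = g then 1 else f g) := by
  have h : a = 28 ∨ a = 12 ∨ a = 35 ∨ a = 80 ∨ a = 18 ∨ a = 27 ∨ a = 9648 ∨
      a = 10749 ∨ a = 878 ∨ a = 53 ∨
      (a ≠ 28 ∧ a ≠ 12 ∧ a ≠ 35 ∧ a ≠ 80 ∧ a ≠ 18 ∧ a ≠ 27 ∧ a ≠ 9648 ∧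
       a ≠ 10749 ∧ a ≠ 878 ∧ a ≠ 53) := by omega
  rcases h with h | h | h | h | h | h | h | h | h | h | ⟨h1, h2, h3, h4, h5, h6, h7, h8, h9, h10⟩ <;>
    first
      | (subst h; simp [GENRES, stepA])
      | simp [GENRES, stepA, h1, h2, h3, h4, h5, h6, h7, h8, h9, h10]

lemma entry_cons (g a : Int) (L : List Int) (f : Int → Int) :
    (if g ∈ L then (1 : Int) else if a = g then 1 else f g)
      = if g ∈ a :: L then 1 else f g := by
  by_cases h1 : g ∈ L
  · simp [List.mem_cons, h1]
  · by_cases h2 : a = g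
    · simp [List.mem_cons, h1, h2]
    · have h3 : ¬g = a := fun h => h2 h.symm
      simp [List.mem_cons, h1, h2, h3]

lemma foldl_ind (L : List Int) (f : Int → Int) :
    L.foldl stepA (GENRES.map f)
      = GENRES.map (fun g => if g ∈ L then 1 else f g) := by
  induction L generalizing f with
  | nil => simp
  | cons a L ih =>
    rw [List.foldl_cons, step_map, ih]
    exact List.map_congr_left (fun g _ => entry_cons g a L f)

-- ===== VERDICT (by name: the statement is the Claim_ definition above) =====
theorem process_genres_spec : Claim_equal_process_genres := by
  intro genre_ids _
  unfold Spec_process_genres process_genres process_genres_alt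
  have h0 : ([0, 0, 0, 0, 0, 0, 0, 0, 0, 0] : List Int)
      = GENRES.map (fun _ => (0 : Int)) := by decide
  rw [h0, foldl_ind]
  refine List.map_congr_left (fun g _ => ?_)
  simp [PySem.Set.mem_ofList]
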